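-- pv_equiv track=rewrite | github.com/srikalyan/Nemotron | src/nemotron/data_prep/core/chat_template.py | validate_conversation
-- ===== SOURCE A (Python) =====
-- def validate_conversation(
--     messages: list[dict],
--     tools: list | None = None,
-- ) -> tuple[bool, str | None]:
--     """Validate conversation for common issues.
--
--     Checks from materialize_fast.py:
--     - Tool calls present in message content but 'tools' key missing
--     - <tool_call> in messages but no '# Tools' header
--
--     Args:
--         messages: List of OpenAI-format messages.
--         tools: Optional list of tool definitions.
--
--     Returns:
--         Tuple of (is_valid, error_message). If is_valid is True,
--         error_message is None.
--
--     Note: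
--         Validation logic from materialize_fast.py
--     """
--     # Check if any message has <tool_call> but no message has # Tools
--     any_tool_call = any(
--         isinstance(m, dict)
--         and (
--             (isinstance(m.get("content"), str) and "<tool_call>" in m.get("content", ""))
--             or (
--                 isinstance(m.get("reasoning_content"), str)
--                 and "<tool_call>" in m.get("reasoning_content", "")
--             )
--         )
--         for m in messages
--     )
--     any_tools_header = any(
--         isinstance(m, dict)
--         and (
--             (isinstance(m.get("content"), str) and "# Tools" in m.get("content", ""))
--             or (
--                 isinstance(m.get("reasoning_content"), str)
--                 and "# Tools" in m.get("reasoning_content", "")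
--             )
--         )
--         for m in messages
--     )
--     if any_tool_call and not any_tools_header:
--         return (
--             False,
--             "Message-level: <tool_call> present but # Tools missing",
--         )
--
--     return (True, None)
-- ===== SOURCE B (Python) =====
-- def validate_conversation(
--     messages: list[dict],
--     tools: list | None = None,
-- ) -> tuple[bool, str | None]:
--     """Single pass over messages maintaining both flags, with early exit."""
--     any_tool_call = False
--     any_tools_header = False
--     for m in messages:
--         if isinstance(m, dict):
--             for key in ("content", "reasoning_content"):
--                 v = m.get(key)
--                 if isinstance(v, str):
--                     if "<tool_call>" in v:
--                         any_tool_call = True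
--                     if "# Tools" in v:
--                         any_tools_header = True
--         if any_tool_call and any_tools_header:
--             break
--     if any_tool_call and not any_tools_header:
--         return (
--             False,
--             "Message-level: <tool_call> present but # Tools missing",
--         )
--     return (True, None)
-- ===== Notes on version B (the rewrite author's own statement) =====
-- stated objective: alternative
-- what changed: Replaces A's two separate any() scans over messages with one loop that maintains both flags (tool_call seen, Tools header seen) and breaks early once both are set.
import Mathlib
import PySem

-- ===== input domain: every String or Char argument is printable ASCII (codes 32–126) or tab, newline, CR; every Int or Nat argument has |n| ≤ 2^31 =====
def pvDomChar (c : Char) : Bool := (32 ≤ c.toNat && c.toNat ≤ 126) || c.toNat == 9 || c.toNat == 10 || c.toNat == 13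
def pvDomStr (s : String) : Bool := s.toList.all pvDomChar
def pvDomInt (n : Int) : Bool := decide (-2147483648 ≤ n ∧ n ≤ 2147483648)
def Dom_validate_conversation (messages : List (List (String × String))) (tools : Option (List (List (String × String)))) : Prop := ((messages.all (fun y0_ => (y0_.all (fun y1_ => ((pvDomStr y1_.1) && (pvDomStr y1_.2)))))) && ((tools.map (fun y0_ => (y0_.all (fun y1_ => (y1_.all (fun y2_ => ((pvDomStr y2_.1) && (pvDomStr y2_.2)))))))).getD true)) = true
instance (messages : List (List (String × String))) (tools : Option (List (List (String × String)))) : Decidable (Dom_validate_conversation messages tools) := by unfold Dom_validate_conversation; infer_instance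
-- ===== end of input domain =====

-- B merges A's two any() scans into one loop over messages maintaining both flags with early exit; same result, single pass (objective: alternative).
-- ===== PORT A =====
-- m.get(key): first-match association-list lookup (dict under the type convention)
def aMsgHas (sub : String) (m : List (String × String)) : Bool :=
  (match m.lookup "content" with
   | some c => PySem.Str.isIn sub c
   | none => false) ||
  (match m.lookup "reasoning_content" with
   | some c => PySem.Str.isIn sub c
   | none => false)

def validate_conversation (messages : List (List (String × String))) (tools : Option (List (List (String × String)))) : Bool × Option String :=
  let any_tool_call := messages.any (fun m => aMsgHas "<tool_call>" m)
  let any_tools_header := messages.any (fun m => aMsgHas "# Tools" m)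
  if any_tool_call && !any_tools_header then
    (false, some "Message-level: <tool_call> present but # Tools missing")
  else
    (true, none)

-- ===== PORT B =====
-- the inner "for key in (…)" loop body of Source B
def altKeyStep (m : List (String × String)) (ab : Bool × Bool) (key : String) : Bool × Bool :=
  match m.lookup key with
  | some v => (ab.1 || PySem.Str.isIn "<tool_call>" v, ab.2 || PySem.Str.isIn "# Tools" v)
  | none => ab

-- the outer "for m in messages" loop of Source B, with the early break
def altLoop : List (List (String × String)) → Bool → Bool → Bool × Bool
  | [], a, b => (a, b)
  | m :: rest, a, b =>
    let ab := ["content", "reasoning_content"].foldl (altKeyStep m) (a, b)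
    if ab.1 && ab.2 then ab else altLoop rest ab.1 ab.2

def validate_conversation_alt (messages : List (List (String × String))) (tools : Option (List (List (String × String)))) : Bool × Option String :=
  let ab := altLoop messages false false
  if ab.1 && !ab.2 then
    (false, some "Message-level: <tool_call> present but # Tools missing")
  else
    (true, none)

-- ===== PRECONDITION & SPEC =====
def Spec_validate_conversation (messages : List (List (String × String))) (tools : Option (List (List (String × String)))) (out : Bool × Option String) : Prop := out = validate_conversation_alt messages tools
instance (messages : List (List (String × String))) (tools : Option (List (List (String × String)))) (out : Bool × Option String) : Decidable (Spec_validate_conversation messages tools out) := by unfold Spec_validate_conversation; infer_instance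

-- ===== CLAIM (what is proved, stated in full; the proofs are below) =====
def Claim_equal_validate_conversation : Prop := ∀ (messages : List (List (String × String))) (tools : Option (List (List (String × String)))), Dom_validate_conversation messages tools → Spec_validate_conversation messages tools (validate_conversation messages tools)

-- ===== LEMMAS AND PROOFS =====
-- processing one message's two keys sets exactly the "has <tool_call>" / "has # Tools" flags
theorem keyfold_eq (m : List (String × String)) (a b : Bool) :
    ["content", "reasoning_content"].foldl (altKeyStep m) (a, b)
      = (a || aMsgHas "<tool_call>" m, b || aMsgHas "# Tools" m) := by
  simp only [List.foldl, altKeyStep, aMsgHas]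
  cases m.lookup "content" <;> cases m.lookup "reasoning_content" <;>
    simp [Bool.or_assoc]

-- the single-pass loop computes both any() scans
theorem altLoop_eq (messages : List (List (String × String))) (a b : Bool) :
    altLoop messages a b
      = (a || messages.any (fun m => aMsgHas "<tool_call>" m),
         b || messages.any (fun m => aMsgHas "# Tools" m)) := by
  induction messages generalizing a b with
  | nil => simp [altLoop]
  | cons m rest ih =>
    simp only [altLoop, keyfold_eq, List.any_cons]
    split_ifs with h
    · rcases Bool.and_eq_true_iff.mp h with ⟨h1, h2⟩
      rw [← Bool.or_assoc, ← Bool.or_assoc, h1, h2]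
      simp
    · rw [ih]
      simp [Bool.or_assoc]

-- ===== VERDICT (by name: the statement is the Claim_ definition above) =====
theorem validate_conversation_spec : Claim_equal_validate_conversation := by
  intro messages tools _
  unfold Spec_validate_conversation validate_conversation validate_conversation_alt
  rw [altLoop_eq]
  simp
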